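-- pv_equiv track=rewrite | github.com/WncFht/GenRec | index/generate_indices.py | get_collision_item
-- ===== SOURCE A (Python) =====
-- def get_collision_item(all_keys):
--     """
--     获取所有发生碰撞的项目的分组。
--
--     参数:
--         all_keys: 包含所有索引 key 的数组/列表（例如 tuple(int,...)）。
--
--     返回:
--         list: 列表中的每个元素是一个列表，包含发生碰撞的项目索引。
--     """
--     index2id = {}  # 字典，用于存储索引到项目ID的映射
--     for i, key in enumerate(all_keys):
--         if key not in index2id:
--             index2id[key] = []
--         index2id[key].append(i)  # 将项目ID添加到对应索引的列表中
--
--     # 只保留有冲突的item（即出现次数大于1的索引）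
--     collision_item_groups = [
--         index2id[index] for index in index2id if len(index2id[index]) > 1
--     ]
--     return collision_item_groups
-- ===== SOURCE B (Python) =====
-- def get_collision_item(all_keys):
--     """Sort-free restructure of the grouping: iterate the distinct keys in
--     first-occurrence order and rescan the input for each key's indices."""
--     groups = []
--     for key in dict.fromkeys(all_keys):
--         grp = [i for i, k in enumerate(all_keys) if k == key]
--         if len(grp) > 1:
--             groups.append(grp)
--     return groups
-- ===== Notes on version B (the rewrite author's own statement) =====
-- stated objective: alternative
-- what changed: Replaces the one-pass dict-of-lists grouping by a dedup of the keys followed by a per-distinct-key rescan of the input that collects each key's indices, keeping groups of size > 1 in the same first-occurrence order.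
import Mathlib
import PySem

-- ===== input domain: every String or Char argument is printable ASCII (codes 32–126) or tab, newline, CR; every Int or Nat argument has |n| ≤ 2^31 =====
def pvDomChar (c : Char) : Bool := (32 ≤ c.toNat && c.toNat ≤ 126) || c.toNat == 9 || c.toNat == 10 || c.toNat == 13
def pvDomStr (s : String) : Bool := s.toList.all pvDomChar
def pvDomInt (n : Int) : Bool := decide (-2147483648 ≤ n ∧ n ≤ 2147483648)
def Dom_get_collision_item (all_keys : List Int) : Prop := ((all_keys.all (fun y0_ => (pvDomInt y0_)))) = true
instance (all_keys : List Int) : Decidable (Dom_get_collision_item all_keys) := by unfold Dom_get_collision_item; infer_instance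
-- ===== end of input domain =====

-- B replaces A's one-pass dict-of-lists grouping by dedup-then-rescan per distinct key; same output, no speed claim.

-- ===== PORT A =====
def get_collision_item (all_keys : List Int) : List (List Int) :=
  let index2id : PySem.Dict Int (List Int) :=
    (PySem.List.enumerate all_keys).foldl
      (fun d p =>
        let d := if d.contains p.2 = false then d.insert p.2 [] else d
        d.modify p.2 [] (fun l => l ++ [p.1]))
      PySem.Dict.empty
  index2id.keys.foldl
    (fun acc index =>
      if (index2id.getD index []).length > 1 then acc ++ [index2id.getD index []] else acc)
    []

-- ===== PORT B =====
def get_collision_item_alt (all_keys : List Int) : List (List Int) :=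
  (PySem.List.dedup all_keys).foldl
    (fun groups key =>
      let grp := (PySem.List.enumerate all_keys).foldl
        (fun acc p => if p.2 == key then acc ++ [p.1] else acc) []
      if grp.length > 1 then groups ++ [grp] else groups)
    []

-- ===== PRECONDITION & SPEC =====
def Spec_get_collision_item (all_keys : List Int) (out : List (List Int)) : Prop := out = get_collision_item_alt all_keys
instance (all_keys : List Int) (out : List (List Int)) : Decidable (Spec_get_collision_item all_keys out) := by unfold Spec_get_collision_item; infer_instance

-- ===== CLAIM (what is proved, stated in full; the proofs are below) =====
def Claim_equal_get_collision_item : Prop := ∀ (all_keys : List Int), Dom_get_collision_item all_keys → Spec_get_collision_item all_keys (get_collision_item all_keys)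

-- ===== LEMMAS AND PROOFS =====

-- A's guarded step ('create empty list if absent, then append') is the plain modify step.
theorem stepA_eq (d : PySem.Dict Int (List Int)) (p : Int × Int) :
    (if d.contains p.2 = false then d.insert p.2 [] else d).modify p.2 [] (fun l => l ++ [p.1])
      = d.modify p.2 [] (fun l => l ++ [p.1]) := by
  by_cases h : d.contains p.2 = false
  · simp only [h, if_true]
    show (d.insert p.2 []).insert p.2 ((d.insert p.2 []).getD p.2 [] ++ [p.1])
        = d.insert p.2 (d.getD p.2 [] ++ [p.1])
    simp [pysem, h]
  · simp [h]

-- A's dict is the canonical modify-append fold over the swapped enumerate pairs.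
theorem dictA_eq (all_keys : List Int) :
    (PySem.List.enumerate all_keys).foldl
      (fun d p =>
        let d := if d.contains p.2 = false then d.insert p.2 [] else d
        d.modify p.2 [] (fun l => l ++ [p.1]))
      PySem.Dict.empty
    = ((PySem.List.enumerate all_keys).map Prod.swap).foldl
        (fun d q => d.modify q.1 [] (fun l => l ++ [q.2])) PySem.Dict.empty := by
  rw [List.foldl_map]
  exact PySem.List.foldl_congr_mem _ _ _ _ (fun d p _ => stepA_eq d p)

-- A's dict: keys are the distinct keys in first-occurrence order.
theorem keysA_eq (all_keys : List Int) :
    (((PySem.List.enumerate all_keys).map Prod.swap).foldl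
      (fun d q => d.modify q.1 [] (fun l => l ++ [q.2])) PySem.Dict.empty).keys
      = PySem.List.dedup all_keys := by
  rw [PySem.Dict.keys_foldl_modify_key ((PySem.List.enumerate all_keys).map Prod.swap)
      (fun q => q.1) [] (fun _ q l => l ++ [q.2]) PySem.Dict.empty]
  have h : ((PySem.List.enumerate all_keys).map Prod.swap).map (fun q => q.1) = all_keys := by
    simp [List.map_map, Function.comp_def, Prod.swap, PySem.List.map_snd_enumerate]
  rw [h, PySem.List.dedup_eq_ofList]
  rfl

-- A's dict: the value stored at k is the list of positions of k.
theorem getDA_eq (all_keys : List Int) (k : Int) :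
    (((PySem.List.enumerate all_keys).map Prod.swap).foldl
      (fun d q => d.modify q.1 [] (fun l => l ++ [q.2])) PySem.Dict.empty).getD k []
      = ((PySem.List.enumerate all_keys).filter (fun p => p.2 == k)).map (fun p => p.1) := by
  rw [PySem.Dict.getD_foldl_modify_append]
  simp [List.filter_map, List.map_map, Function.comp_def, Prod.swap]

-- ===== VERDICT (by name: the statement is the Claim_ definition above) =====
theorem get_collision_item_spec : Claim_equal_get_collision_item := by
  intro all_keys _
  show get_collision_item all_keys = get_collision_item_alt all_keys
  simp only [get_collision_item, get_collision_item_alt]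
  rw [dictA_eq, keysA_eq]
  refine PySem.List.foldl_congr_mem _ _ _ _ ?_
  intro acc key _
  rw [getDA_eq all_keys key,
      PySem.List.foldl_append_if (fun p => p.2 == key) (fun p => p.1) (PySem.List.enumerate all_keys) []]
  simp
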